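-- pv_equiv track=rewrite | github.com/Jiezhi/myleetcode | lccn/2022-fall-team-03.py | beautifulBouquet
-- ===== SOURCE A (Python) =====
-- from collections import Counter, defaultdict
-- from typing import List, Optional
--
-- def beautifulBouquet(flowers: List[int], cnt: int) -> int:
--     mod = 10 ** 9 + 7
--     n = len(flowers)
--     dc = defaultdict(int)
--     ret = 0
--
--     i, j = 0, 0
--     while j < n:
--         dc[flowers[j]] += 1
--         while i <= j and dc[flowers[j]] > cnt:
--             dc[flowers[i]] -= 1
--             i += 1
--         ret += j - i + 1
--         ret %= mod
--         j += 1
--     return ret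
-- ===== SOURCE B (Python) =====
-- from collections import defaultdict
-- from typing import List
--
-- def beautifulBouquet(flowers: List[int], cnt: int) -> int:
--     MOD = 10 ** 9 + 7
--     if cnt < 0:
--         return 0
--     pos = defaultdict(list)
--     left = 0
--     ret = 0
--     for j, v in enumerate(flowers):
--         p = pos[v]
--         p.append(j)
--         if len(p) > cnt:
--             left = max(left, p[len(p) - cnt - 1] + 1)
--         ret = (ret + j - left + 1) % MOD
--     return ret
-- ===== Notes on version B (the rewrite author's own statement) =====
-- stated objective: alternative
-- what changed: Replaces A's count-dictionary sliding window with its inner shrink-while loop by per-value occurrence-position lists: the window start is computed directly as the running max of (the (cnt+1)-th-from-last stored position of the current value) + 1, so there is no inner loop and no decrementing counter.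
import Mathlib
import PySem

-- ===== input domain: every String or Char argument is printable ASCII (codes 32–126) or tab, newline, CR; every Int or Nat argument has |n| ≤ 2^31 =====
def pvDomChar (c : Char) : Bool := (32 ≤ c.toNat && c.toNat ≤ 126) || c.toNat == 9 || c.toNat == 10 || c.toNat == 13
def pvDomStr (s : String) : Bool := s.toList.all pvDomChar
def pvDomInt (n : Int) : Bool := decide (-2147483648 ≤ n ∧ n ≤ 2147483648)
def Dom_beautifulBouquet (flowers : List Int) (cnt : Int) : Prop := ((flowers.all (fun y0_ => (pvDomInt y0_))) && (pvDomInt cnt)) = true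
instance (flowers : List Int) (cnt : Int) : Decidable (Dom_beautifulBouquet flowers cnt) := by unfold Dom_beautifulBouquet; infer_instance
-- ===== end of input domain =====

-- B replaces A's count-dict sliding window (inner shrink-while moving `i`) by per-value occurrence
-- position lists: the window start is computed directly as max over the (cnt+1)-th-from-last stored
-- position + 1 — a different data structure and no inner loop (objective: alternative).

-- ===== PORT A =====
-- inner `while i <= j and dc[flowers[j]] > cnt: dc[flowers[i]] -= 1; i += 1`
def innerA (flowers : List Int) (cnt : Int) (j : Nat) (i : Nat) (dc : PySem.Dict Int Int) :
    Nat × PySem.Dict Int Int :=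
  if h : i ≤ j ∧ cnt < dc.getD (flowers.getD j 0) 0 then
    innerA flowers cnt j (i + 1)
      (dc.insert (flowers.getD i 0) (dc.getD (flowers.getD i 0) 0 - 1))
  else (i, dc)
termination_by j + 1 - i
decreasing_by omega

-- one iteration of A's outer `while j < n` loop; state = (i, dc, ret)
def stepA (flowers : List Int) (cnt : Int) (st : Nat × PySem.Dict Int Int × Int) (j : Nat) :
    Nat × PySem.Dict Int Int × Int :=
  let x := flowers.getD j 0
  let dc1 := st.2.1.insert x (st.2.1.getD x 0 + 1)
  let p := innerA flowers cnt j st.1 dc1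
  (p.1, p.2, PySem.Int.mod (st.2.2 + ((j : Int) - (p.1 : Int) + 1)) (10 ^ 9 + 7))

def beautifulBouquet (flowers : List Int) (cnt : Int) : Int :=
  ((List.range flowers.length).foldl (stepA flowers cnt) (0, PySem.Dict.empty, 0)).2.2

-- ===== PORT B =====
-- one iteration of B's `for j, v in enumerate(flowers)` loop; state = (pos, left, ret)
def stepB (cnt : Int) (st : PySem.Dict Int (List Int) × Int × Int) (jv : Int × Int) :
    PySem.Dict Int (List Int) × Int × Int :=
  let p := st.1.getD jv.2 [] ++ [jv.1]
  let pos := st.1.insert jv.2 p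
  let left := if cnt < (p.length : Int) then
      max st.2.1 (PySem.List.pyGetD p ((p.length : Int) - cnt - 1) 0 + 1)
    else st.2.1
  (pos, left, PySem.Int.mod (st.2.2 + (jv.1 - left + 1)) (10 ^ 9 + 7))

def beautifulBouquet_alt (flowers : List Int) (cnt : Int) : Int :=
  if cnt < 0 then 0
  else ((PySem.List.enumerate flowers 0).foldl (stepB cnt) (PySem.Dict.empty, 0, 0)).2.2

-- ===== PRECONDITION & SPEC =====
def Spec_beautifulBouquet (flowers : List Int) (cnt : Int) (out : Int) : Prop := out = beautifulBouquet_alt flowers cnt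
instance (flowers : List Int) (cnt : Int) (out : Int) : Decidable (Spec_beautifulBouquet flowers cnt out) := by unfold Spec_beautifulBouquet; infer_instance

-- ===== CLAIM (what is proved, stated in full; the proofs are below) =====
def Claim_equal_beautifulBouquet : Prop := ∀ (flowers : List Int) (cnt : Int), Dom_beautifulBouquet flowers cnt → Spec_beautifulBouquet flowers cnt (beautifulBouquet flowers cnt)

-- ===== LEMMAS AND PROOFS =====

-- occurrence positions of value v among indices < b
def occs (f : List Int) (v : Int) (b : Nat) : List Nat :=
  (List.range b).filter (fun k => f.getD k 0 = v)

-- number of occurrences of v at indices in [a, b)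
def cIn (f : List Int) (v : Int) (a b : Nat) : Nat :=
  (occs f v b).countP (fun k => a ≤ k)

-- the window start forced by position j: (cnt+1)-th-from-last occurrence of f[j] in [0, j] plus 1
def thr (f : List Int) (cnt : Int) (j : Nat) : Nat :=
  if cnt < ((occs f (f.getD j 0) (j + 1)).length : Int) then
    (occs f (f.getD j 0) (j + 1)).getD ((occs f (f.getD j 0) (j + 1)).length - cnt.toNat - 1) 0 + 1
  else 0

def loopA (f : List Int) (cnt : Int) (j : Nat) : Nat × PySem.Dict Int Int × Int :=
  (List.range j).foldl (stepA f cnt) (0, PySem.Dict.empty, 0)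

def loopB (f : List Int) (cnt : Int) (j : Nat) : PySem.Dict Int (List Int) × Int × Int :=
  ((List.range j).map (fun (k : Nat) => ((k : Int), f.getD k 0))).foldl (stepB cnt) (PySem.Dict.empty, 0, 0)

lemma occs_pairwise (f : List Int) (v : Int) (b : Nat) : (occs f v b).Pairwise (· < ·) := by
  unfold occs
  exact List.Pairwise.sublist List.filter_sublist List.pairwise_lt_range


lemma occs_succ (f : List Int) (v : Int) (j : Nat) :
    occs f v (j + 1) = occs f v j ++ if f.getD j 0 = v then [j] else [] := by
  unfold occs
  rw [List.range_succ, List.filter_append]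
  simp [List.filter_singleton]


lemma mem_occs {f : List Int} {v : Int} {b k : Nat} (h : k ∈ occs f v b) :
    k < b ∧ f.getD k 0 = v := by
  simpa [occs, List.mem_filter] using h


lemma filter_le_getD_of_pairwise (p : List Nat) (hp : p.Pairwise (· < ·)) (q : Nat)
    (hq : q < p.length) : p.filter (fun k => p.getD q 0 ≤ k) = p.drop q := by
  induction p generalizing q with
  | nil => simp at hq
  | cons a rest ih =>
    rcases q with _ | q
    · simp only [List.getD_cons_zero, List.drop_zero]
      rw [List.filter_cons_of_pos (by simp)]
      congr 1
      refine List.filter_eq_self.mpr (fun b hb => ?_)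
      have := (List.pairwise_cons.mp hp).1 b hb
      simp; omega
    · have hq' : q < rest.length := by simpa using hq
      have hlt : a < rest.getD q 0 := by
        have hm : rest.getD q 0 ∈ rest := by
          rw [List.getD_eq_getElem rest 0 hq']; exact List.getElem_mem hq'
        exact (List.pairwise_cons.mp hp).1 _ hm
      simp only [List.getD_cons_succ, List.drop_succ_cons]
      rw [List.filter_cons_of_neg (by simp only [decide_eq_true_eq]; omega)]
      exact ih (List.pairwise_cons.mp hp).2 q hq'


lemma filter_lt_getD_of_pairwise (p : List Nat) (hp : p.Pairwise (· < ·)) (q : Nat)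
    (hq : q < p.length) : p.filter (fun k => p.getD q 0 + 1 ≤ k) = p.drop (q + 1) := by
  induction p generalizing q with
  | nil => simp at hq
  | cons a rest ih =>
    rcases q with _ | q
    · simp only [List.getD_cons_zero, List.drop_succ_cons, List.drop_zero]
      rw [List.filter_cons_of_neg (by simp)]
      refine List.filter_eq_self.mpr (fun b hb => ?_)
      have := (List.pairwise_cons.mp hp).1 b hb
      simp; omega
    · have hq' : q < rest.length := by simpa using hq
      have hlt : a < rest.getD q 0 := by
        have hm : rest.getD q 0 ∈ rest := by
          rw [List.getD_eq_getElem rest 0 hq']; exact List.getElem_mem hq'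
        exact (List.pairwise_cons.mp hp).1 _ hm
      simp only [List.getD_cons_succ, List.drop_succ_cons]
      rw [List.filter_cons_of_neg (by simp only [decide_eq_true_eq]; omega)]
      exact ih (List.pairwise_cons.mp hp).2 q hq'


lemma countP_succ_of_not_mem (p : List Nat) (i : Nat) (h : i ∉ p) :
    p.countP (fun k => i + 1 ≤ k) = p.countP (fun k => i ≤ k) := by
  refine List.countP_congr (fun k hk => ?_)
  have : k ≠ i := fun h' => h (h' ▸ hk)
  simp; omega


lemma countP_succ_of_mem (p : List Nat) (hnd : p.Nodup) (i : Nat) (h : i ∈ p) :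
    p.countP (fun k => i ≤ k) = p.countP (fun k => i + 1 ≤ k) + 1 := by
  induction p with
  | nil => simp at h
  | cons a rest ih =>
    rcases List.nodup_cons.mp hnd with ⟨hna, hnr⟩
    rcases List.mem_cons.mp h with hia | hm
    · subst hia
      rw [List.countP_cons, List.countP_cons]
      have h1 : (decide (i ≤ i)) = true := by simp
      have h2 : (decide (i + 1 ≤ i)) = false := by simp
      rw [h1, h2, countP_succ_of_not_mem rest i hna]
      simp
    · rw [List.countP_cons, List.countP_cons, ih hnr hm]
      have : a ≠ i := fun h' => hna (h' ▸ hm)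
      have : (decide (i ≤ a)) = (decide (i + 1 ≤ a)) := by
        simp; omega
      rw [this]; omega


lemma cIn_anti (f : List Int) (v : Int) {a a' : Nat} (b : Nat) (h : a ≤ a') :
    cIn f v a' b ≤ cIn f v a b := by
  unfold cIn
  refine List.countP_mono_left (fun k hk hk' => ?_)
  simp only [decide_eq_true_eq] at hk' ⊢
  omega


lemma cIn_zero (f : List Int) (v : Int) (b : Nat) : cIn f v 0 b = (occs f v b).length := by
  unfold cIn
  rw [List.countP_eq_length.mpr (by intro k _; simp)]


lemma cIn_ge (f : List Int) (v : Int) {a b : Nat} (h : b ≤ a) : cIn f v a b = 0 := by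
  unfold cIn
  rw [List.countP_eq_zero.mpr]
  intro k hk
  have := (mem_occs hk).1
  simp; omega


lemma cIn_at_getD (f : List Int) (v : Int) (b q : Nat) (hq : q < (occs f v b).length) :
    cIn f v ((occs f v b).getD q 0) b = (occs f v b).length - q := by
  unfold cIn
  rw [List.countP_eq_length_filter, filter_le_getD_of_pairwise _ (occs_pairwise f v b) q hq,
    List.length_drop]


lemma cIn_after_getD (f : List Int) (v : Int) (b q : Nat) (hq : q < (occs f v b).length) :
    cIn f v ((occs f v b).getD q 0 + 1) b = (occs f v b).length - q - 1 := by
  unfold cIn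
  rw [List.countP_eq_length_filter, filter_lt_getD_of_pairwise _ (occs_pairwise f v b) q hq,
    List.length_drop]
  omega


-- exit condition of the inner loop: count ≤ cnt forces thr ≤ i
lemma thr_le {f : List Int} {cnt : Int} {j i : Nat} (hc : 0 ≤ cnt)
    (h : (cIn f (f.getD j 0) i (j + 1) : Int) ≤ cnt) : thr f cnt j ≤ i := by
  unfold thr
  split_ifs with hlen
  · set p := occs f (f.getD j 0) (j + 1) with hpdef
    set q := p.length - cnt.toNat - 1 with hqdef
    have hct : cnt.toNat < p.length := by omega
    have hq : q < p.length := by omega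
    by_contra hcon
    rw [not_le] at hcon
    have hanti := cIn_anti f (f.getD j 0) (j + 1) (a := i) (a' := p.getD q 0) (by omega)
    have hat := cIn_at_getD f (f.getD j 0) (j + 1) q hq
    simp only [← hpdef] at hat hanti
    rw [hat] at hanti
    omega
  · omega

lemma thr_gt {f : List Int} {cnt : Int} {j i : Nat} (hc : 0 ≤ cnt)
    (h : cnt < (cIn f (f.getD j 0) i (j + 1) : Int)) : i < thr f cnt j := by
  have h0 := cIn_anti f (f.getD j 0) (j + 1) (a := 0) (a' := i) (Nat.zero_le i)
  have hz := cIn_zero f (f.getD j 0) (j + 1)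
  have hlen : cnt < ((occs f (f.getD j 0) (j + 1)).length : Int) := by omega
  unfold thr
  rw [if_pos hlen]
  set p := occs f (f.getD j 0) (j + 1) with hpdef
  set q := p.length - cnt.toNat - 1 with hqdef
  have hct : cnt.toNat < p.length := by omega
  have hq : q < p.length := by omega
  by_contra hcon
  rw [not_lt] at hcon
  have hanti := cIn_anti f (f.getD j 0) (j + 1) (a := p.getD q 0 + 1) (a' := i) (by omega)
  have hafter := cIn_after_getD f (f.getD j 0) (j + 1) q hq
  simp only [← hpdef] at hafter hanti
  rw [hafter] at hanti
  omega


lemma thr_le_succ (f : List Int) (cnt : Int) (j : Nat) : thr f cnt j ≤ j + 1 := by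
  unfold thr
  split_ifs with hlen
  · set p := occs f (f.getD j 0) (j + 1) with hpdef
    set q := p.length - cnt.toNat - 1 with hqdef
    by_cases hq : q < p.length
    · have hm : p.getD q 0 ∈ p := by
        rw [List.getD_eq_getElem p 0 hq]; exact List.getElem_mem hq
      have := (mem_occs hm).1
      omega
    · rw [List.getD_eq_default _ _ (by omega)]
      omega
  · omega


lemma innerA_spec (f : List Int) (cnt : Int) (hc : 0 ≤ cnt) (j : Nat) :
    ∀ (i : Nat) (dc : PySem.Dict Int Int), i ≤ j + 1 →
    (∀ v, dc.getD v 0 = (cIn f v i (j + 1) : Int)) →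
    (innerA f cnt j i dc).1 = max i (thr f cnt j) ∧
    (∀ v, (innerA f cnt j i dc).2.getD v 0 = (cIn f v (innerA f cnt j i dc).1 (j + 1) : Int)) := by
  intro i dc
  induction i, dc using innerA.induct f cnt j with
  | case1 i dc h ih =>
    intro hij hdc
    have hx := hdc (f.getD j 0)
    have hcnt : cnt < (cIn f (f.getD j 0) i (j + 1) : Int) := by rw [← hx]; exact h.2
    have hthr := thr_gt hc hcnt
    rw [innerA, dif_pos h]
    have hdc' : ∀ v, (dc.insert (f.getD i 0) (dc.getD (f.getD i 0) 0 - 1)).getD v 0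
        = (cIn f v (i + 1) (j + 1) : Int) := by
      intro v
      rw [PySem.Dict.getD_insert]
      by_cases hv : v = f.getD i 0
      · rw [if_pos hv, hdc (f.getD i 0)]
        have hmem : i ∈ occs f (f.getD i 0) (j + 1) := by
          unfold occs
          simp only [List.mem_filter, List.mem_range, decide_eq_true_eq]
          exact ⟨by omega, trivial⟩
        have hnd : (occs f (f.getD i 0) (j + 1)).Nodup :=
          (occs_pairwise f _ (j + 1)).imp (fun hlt => Nat.ne_of_lt hlt)
        have hstep := countP_succ_of_mem _ hnd i hmem
        rw [hv]
        unfold cIn at *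
        omega
      · rw [if_neg hv, hdc v]
        have hnm : i ∉ occs f v (j + 1) := fun hmem => hv (mem_occs hmem).2.symm
        have hstep := countP_succ_of_not_mem _ i hnm
        unfold cIn
        rw [hstep]
    obtain ⟨he, hd⟩ := ih (by omega) hdc'
    refine ⟨?_, hd⟩
    rw [he]
    omega
  | case2 i dc h =>
    intro hij hdc
    rw [innerA, dif_neg h]
    have hcle : (cIn f (f.getD j 0) i (j + 1) : Int) ≤ cnt := by
      by_cases hij2 : i ≤ j
      · have h2 : ¬ cnt < dc.getD (f.getD j 0) 0 := fun hgt => h ⟨hij2, hgt⟩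
        rw [hdc (f.getD j 0)] at h2
        omega
      · have hz : cIn f (f.getD j 0) i (j + 1) = 0 := cIn_ge f _ (by omega)
        rw [hz]
        omega
    have hle := thr_le hc hcle
    exact ⟨by show i = max i (thr f cnt j); omega, fun v => hdc v⟩

lemma stepAB (f : List Int) (cnt : Int) (hc : 0 ≤ cnt) (j iA : Nat) (dc : PySem.Dict Int Int)
    (retA : Int) (pos : PySem.Dict Int (List Int)) (hij : iA ≤ j)
    (hdc : ∀ v, dc.getD v 0 = (cIn f v iA j : Int))
    (hpos : ∀ v, pos.getD v [] = (occs f v j).map Int.ofNat) :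
    ((stepA f cnt (iA, dc, retA) j).1 : Int)
        = (stepB cnt (pos, (iA : Int), retA) ((j : Int), f.getD j 0)).2.1 ∧
    (stepA f cnt (iA, dc, retA) j).2.2
        = (stepB cnt (pos, (iA : Int), retA) ((j : Int), f.getD j 0)).2.2 ∧
    (stepA f cnt (iA, dc, retA) j).1 ≤ j + 1 ∧
    (∀ v, (stepA f cnt (iA, dc, retA) j).2.1.getD v 0
        = (cIn f v (stepA f cnt (iA, dc, retA) j).1 (j + 1) : Int)) ∧
    (∀ v, (stepB cnt (pos, (iA : Int), retA) ((j : Int), f.getD j 0)).1.getD v []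
        = (occs f v (j + 1)).map Int.ofNat) := by
  have hdc1 : ∀ v, (dc.insert (f.getD j 0) (dc.getD (f.getD j 0) 0 + 1)).getD v 0
      = (cIn f v iA (j + 1) : Int) := by
    intro v
    rw [PySem.Dict.getD_insert]
    split_ifs with hv
    · rw [hv, hdc (f.getD j 0)]
      unfold cIn
      rw [occs_succ f (f.getD j 0) j, if_pos rfl, List.countP_append]
      have h1 : List.countP (fun k => decide (iA ≤ k)) [j] = 1 := by simp [hij]
      rw [h1]
      push_cast
      ring
    · rw [hdc v]
      unfold cIn
      rw [occs_succ f v j, if_neg (fun he => hv he.symm), List.append_nil]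
  obtain ⟨hieq, hdcF⟩ := innerA_spec f cnt hc j iA _ (by omega) hdc1
  have hpx : pos.getD (f.getD j 0) [] ++ [(j : Int)]
      = (occs f (f.getD j 0) (j + 1)).map Int.ofNat := by
    rw [hpos (f.getD j 0), occs_succ f (f.getD j 0) j, if_pos rfl, List.map_append]
    simp
  have hleftExpr : (if cnt < ((pos.getD (f.getD j 0) [] ++ [(j : Int)]).length : Int) then
        max (iA : Int) (PySem.List.pyGetD (pos.getD (f.getD j 0) [] ++ [(j : Int)])
          (((pos.getD (f.getD j 0) [] ++ [(j : Int)]).length : Int) - cnt - 1) 0 + 1)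
      else (iA : Int)) = ((max iA (thr f cnt j) : Nat) : Int) := by
    rw [hpx, List.length_map]
    set L := (occs f (f.getD j 0) (j + 1)).length with hL
    by_cases hl : cnt < (L : Int)
    · rw [if_pos hl]
      have hct : cnt.toNat < L := by omega
      have hq : L - cnt.toNat - 1 < L := by omega
      have hidx : (L : Int) - cnt - 1 = ((L - cnt.toNat - 1 : Nat) : Int) := by omega
      rw [hidx, PySem.List.pyGetD_natCast]
      have hgd : ((occs f (f.getD j 0) (j + 1)).map Int.ofNat).getD (L - cnt.toNat - 1) 0
          = Int.ofNat ((occs f (f.getD j 0) (j + 1)).getD (L - cnt.toNat - 1) 0) := by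
        rw [List.getD_eq_getElem _ _ (by simpa using hq), List.getElem_map,
          List.getD_eq_getElem _ _ hq]
      rw [hgd]
      unfold thr
      rw [← hL, if_pos hl]
      push_cast [Nat.cast_max, Int.ofNat_eq_natCast]
      ring_nf
    · rw [if_neg hl]
      unfold thr
      rw [← hL, if_neg hl]
      simp
  refine ⟨?_, ?_, ?_, fun v => ?_, fun v => ?_⟩
  · simp only [stepA, stepB]
    rw [hieq, hleftExpr]
  · simp only [stepA, stepB]
    rw [hieq, hleftExpr]
  · simp only [stepA]
    rw [hieq]
    have := thr_le_succ f cnt j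
    omega
  · simp only [stepA]
    exact hdcF v
  · simp only [stepB]
    rw [PySem.Dict.getD_insert]
    split_ifs with hv
    · rw [hv]
      exact hpx
    · rw [hpos v, occs_succ f v j, if_neg (fun he => hv he.symm), List.append_nil]

lemma loop_invariant (f : List Int) (cnt : Int) (hc : 0 ≤ cnt) (j : Nat) :
    ((loopA f cnt j).1 : Int) = (loopB f cnt j).2.1 ∧
    (loopA f cnt j).2.2 = (loopB f cnt j).2.2 ∧
    (loopA f cnt j).1 ≤ j ∧
    (∀ v, (loopA f cnt j).2.1.getD v 0 = (cIn f v (loopA f cnt j).1 j : Int)) ∧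
    (∀ v, (loopB f cnt j).1.getD v [] = (occs f v j).map Int.ofNat) := by
  induction j with
  | zero =>
    refine ⟨rfl, rfl, le_refl 0, fun v => ?_, fun v => ?_⟩
    · simp [loopA, PySem.Dict.getD_empty, cIn, occs]
    · simp [loopB, PySem.Dict.getD_empty, occs]
  | succ j ih =>
    obtain ⟨hil, hret, hij, hdc, hpos⟩ := ih
    have hA : loopA f cnt (j + 1) = stepA f cnt ((loopA f cnt j).1, (loopA f cnt j).2.1, (loopA f cnt j).2.2) j := by
      unfold loopA
      rw [List.range_succ, List.foldl_append]
      rfl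
    have hB : loopB f cnt (j + 1)
        = stepB cnt ((loopB f cnt j).1, (loopB f cnt j).2.1, (loopB f cnt j).2.2) ((j : Int), f.getD j 0) := by
      unfold loopB
      rw [List.range_succ, List.map_append, List.foldl_append]
      rfl
    rw [← hil, ← hret] at hB
    obtain ⟨c1, c2, c3, c4, c5⟩ := stepAB f cnt hc j (loopA f cnt j).1 (loopA f cnt j).2.1
      (loopA f cnt j).2.2 (loopB f cnt j).1 hij hdc hpos
    exact ⟨by rw [hA, hB]; exact c1, by rw [hA, hB]; exact c2, by rw [hA]; exact c3,
      by rw [hA]; exact c4, by rw [hB]; exact c5⟩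

lemma loopA_neg (f : List Int) (cnt : Int) (hc : cnt < 0) (j : Nat) :
    (loopA f cnt j).1 = j ∧ (loopA f cnt j).2.2 = 0 ∧
    (∀ v, (loopA f cnt j).2.1.getD v 0 = 0) := by
  induction j with
  | zero =>
    refine ⟨rfl, rfl, fun v => ?_⟩
    simp [loopA, PySem.Dict.getD_empty]
  | succ j ih =>
    obtain ⟨h1, h2, h3⟩ := ih
    have hstep : loopA f cnt (j + 1) = stepA f cnt (loopA f cnt j) j := by
      unfold loopA
      rw [List.range_succ, List.foldl_append]
      rfl
    set x := f.getD j 0 with hx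
    set dc1 := (loopA f cnt j).2.1.insert x ((loopA f cnt j).2.1.getD x 0 + 1) with hdc1def
    have hdc1 : ∀ v, dc1.getD v 0 = if v = x then 1 else 0 := by
      intro v
      rw [hdc1def, PySem.Dict.getD_insert]
      split_ifs with hv
      · rw [h3 x]; norm_num
      · exact h3 v
    have hinner : innerA f cnt j (loopA f cnt j).1 dc1
        = ((loopA f cnt j).1 + 1, dc1.insert (f.getD (loopA f cnt j).1 0) (dc1.getD (f.getD (loopA f cnt j).1 0) 0 - 1)) := by
      rw [innerA, dif_pos ⟨by omega, by rw [hdc1 x]; simp; omega⟩,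
        innerA, dif_neg (by rw [h1]; intro hcon; omega)]
    refine ⟨?_, ?_, fun v => ?_⟩
    · rw [hstep]
      show (innerA f cnt j (loopA f cnt j).1 dc1).1 = j + 1
      rw [hinner, h1]
    · rw [hstep]
      show PySem.Int.mod ((loopA f cnt j).2.2 + ((j : Int) - ((innerA f cnt j (loopA f cnt j).1 dc1).1 : Int) + 1)) (10 ^ 9 + 7) = 0
      rw [hinner, h1, h2, PySem.Int.mod_eq_emod_of_pos (by norm_num)]
      push_cast
      ring_nf
      simp
    · rw [hstep]
      show (innerA f cnt j (loopA f cnt j).1 dc1).2.getD v 0 = 0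
      rw [hinner, h1, PySem.Dict.getD_insert]
      split_ifs with hv
      · rw [hdc1, if_pos hx.symm]; norm_num
      · rw [hdc1, if_neg hv]

lemma enumerate_eq_map_range (f : List Int) :
    PySem.List.enumerate f 0 = (List.range f.length).map (fun (k : Nat) => ((k : Int), f.getD k 0)) := by
  rw [PySem.List.enumerate_eq_map_pyRange (d := 0), PySem.List.pyRange_one]
  simp only [List.map_map, PySem.List.len]
  refine List.map_congr_left (fun k hk => ?_)
  simp [PySem.List.pyGetD_natCast]

-- ===== VERDICT (by name: the statement is the Claim_ definition above) =====
theorem beautifulBouquet_spec : Claim_equal_beautifulBouquet := by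
  intro flowers cnt _
  show beautifulBouquet flowers cnt = beautifulBouquet_alt flowers cnt
  by_cases hc : cnt < 0
  · have h := loopA_neg flowers cnt hc flowers.length
    simp [beautifulBouquet, beautifulBouquet_alt, hc, loopA] at *
    exact h.2.1
  · rw [not_lt] at hc
    have h := loop_invariant flowers cnt hc flowers.length
    simp only [beautifulBouquet, beautifulBouquet_alt, if_neg (not_lt.mpr hc),
      enumerate_eq_map_range]
    exact h.2.1
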